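-- pv_equiv track=rewrite | github.com/shakibaam/CS-686-Assignments | A4-RL/reinforcement.py | get_grid
-- ===== SOURCE A (Python) =====
-- def get_grid(grid_name:str):
--     """
--     This function produces one of the three grids defined in the assignment as a nested list
--
--     :param grid_name: the name of the grid. Should be one of 'fourroom', 'maze', or 'empty'
--     :type grid_name: str
--     :return: The corresponding grid, where True indicates a wall and False a space
--     :rtype: list[list[bool]]
--     """
--     grid = [[False for i in range(5)] for j in range(5)] # default case is 'empty'
--     if grid_name == 'fourroom':
--         grid[0][2] = True
--         grid[2][0] = True
--         grid[2][1] = True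
--         grid[2][3] = True
--         grid[2][4] = True
--         grid[4][2] = True
--     elif grid_name == 'maze':
--         grid[1][1] = True
--         grid[1][2] = True
--         grid[1][3] = True
--         grid[2][3] = True
--         grid[3][1] = True
--         grid[4][1] = True
--         grid[4][2] = True
--         grid[4][3] = True
--         grid[4][4] = True
--     return grid
-- ===== SOURCE B (Python) =====
-- WALLS = {
--     'fourroom': {(0, 2), (2, 0), (2, 1), (2, 3), (2, 4), (4, 2)},
--     'maze': {(1, 1), (1, 2), (1, 3), (2, 3), (3, 1), (4, 1), (4, 2), (4, 3), (4, 4)},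
-- }
--
-- def get_grid(grid_name: str):
--     walls = WALLS.get(grid_name, set())
--     return [[(i, j) in walls for j in range(5)] for i in range(5)]
-- ===== Notes on version B (the rewrite author's own statement) =====
-- stated objective: simpler
-- what changed: Replaced the default-grid-then-mutate-specific-cells scheme with a prebuilt wall-coordinate table and a single uniform per-cell membership scan.
import Mathlib
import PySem

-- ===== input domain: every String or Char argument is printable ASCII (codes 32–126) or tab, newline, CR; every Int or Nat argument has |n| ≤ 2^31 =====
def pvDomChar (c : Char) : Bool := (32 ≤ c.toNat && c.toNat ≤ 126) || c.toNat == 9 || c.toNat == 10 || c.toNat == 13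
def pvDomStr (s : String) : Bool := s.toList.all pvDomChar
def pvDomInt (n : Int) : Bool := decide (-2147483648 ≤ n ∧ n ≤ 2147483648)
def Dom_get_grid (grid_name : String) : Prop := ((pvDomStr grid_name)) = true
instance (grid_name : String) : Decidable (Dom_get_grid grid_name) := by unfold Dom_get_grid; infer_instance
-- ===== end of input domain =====

-- B replaces A's default-then-mutate-cells construction with a wall-coordinate table and a uniform per-cell membership scan (simpler).


-- ===== PORT A =====
-- port of A: build the all-False 5x5 grid, then set the named cells via nested List.set
def pvSetCell (g : List (List Bool)) (r c : Nat) : List (List Bool) :=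
  g.set r ((g.getD r []).set c true)

def get_grid (grid_name : String) : List (List Bool) :=
  let grid := (List.range 5).map (fun _j => (List.range 5).map (fun _i => false))
  if grid_name == "fourroom" then
    let grid := pvSetCell grid 0 2
    let grid := pvSetCell grid 2 0
    let grid := pvSetCell grid 2 1
    let grid := pvSetCell grid 2 3
    let grid := pvSetCell grid 2 4
    let grid := pvSetCell grid 4 2
    grid
  else if grid_name == "maze" then
    let grid := pvSetCell grid 1 1
    let grid := pvSetCell grid 1 2
    let grid := pvSetCell grid 1 3
    let grid := pvSetCell grid 2 3
    let grid := pvSetCell grid 3 1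
    let grid := pvSetCell grid 4 1
    let grid := pvSetCell grid 4 2
    let grid := pvSetCell grid 4 3
    let grid := pvSetCell grid 4 4
    grid
  else grid

-- ===== PORT B =====
-- port of B: wall-coordinate table + uniform per-cell membership scan
def pvWalls : PySem.Dict String (PySem.Set (Nat × Nat)) :=
  (PySem.Dict.empty).insert "fourroom" (PySem.Set.ofList [(0, 2), (2, 0), (2, 1), (2, 3), (2, 4), (4, 2)])
    |>.insert "maze" (PySem.Set.ofList [(1, 1), (1, 2), (1, 3), (2, 3), (3, 1), (4, 1), (4, 2), (4, 3), (4, 4)])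

def get_grid_alt (grid_name : String) : List (List Bool) :=
  let walls := pvWalls.getD grid_name (PySem.Set.ofList [])
  (List.range 5).map (fun i => (List.range 5).map (fun j => decide ((i, j) ∈ walls)))

-- ===== PRECONDITION & SPEC =====
def Spec_get_grid (grid_name : String) (out : List (List Bool)) : Prop := out = get_grid_alt grid_name
instance (grid_name : String) (out : List (List Bool)) : Decidable (Spec_get_grid grid_name out) := by unfold Spec_get_grid; infer_instance

-- ===== CLAIM (what is proved, stated in full; the proofs are below) =====
def Claim_equal_get_grid : Prop := ∀ (grid_name : String), Dom_get_grid grid_name → Spec_get_grid grid_name (get_grid grid_name)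

-- ===== LEMMAS AND PROOFS =====

-- ===== VERDICT (by name: the statement is the Claim_ definition above) =====
theorem get_grid_spec : Claim_equal_get_grid := by
  intro grid_name _
  unfold Spec_get_grid
  by_cases h1 : grid_name = "fourroom"
  · subst h1; decide
  · by_cases h2 : grid_name = "maze"
    · subst h2; decide
    · have hb1 : (grid_name == "fourroom") = false := by simp [h1]
      have hb2 : (grid_name == "maze") = false := by simp [h2]
      have hw : pvWalls.getD grid_name (PySem.Set.ofList []) = PySem.Set.ofList [] := by
        rw [pvWalls, PySem.Dict.getD_insert_of_ne _ _ _ h2,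
          PySem.Dict.getD_insert_of_ne _ _ _ h1, PySem.Dict.getD_empty]
      simp only [get_grid, get_grid_alt, hb1, hb2, hw]
      decide
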